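-- pv_equiv track=rewrite | github.com/pypi-data/pypi-mirror-291 | packages/rst-fast-parse/rst_fast_parse-0.0.16-py3-none-any.whl/rst_fast_parse/_opqrstu/ccccbbbb.py | gAAAAABmw_nQrxQ8oYk58G8bWja9f0Bligp32_mtaHVTIGvBERt3xFf9J_kXxOhNyqp7hRZAEdpmaFe8bMwtPMKDegoBO_t1kw__
-- ===== SOURCE A (Python) =====
-- from typing import NewType
--
-- NulledStr = NewType('NulledStr', str)
--
-- def gAAAAABmw_nQrxQ8oYk58G8bWja9f0Bligp32_mtaHVTIGvBERt3xFf9J_kXxOhNyqp7hRZAEdpmaFe8bMwtPMKDegoBO_t1kw__(text: str) -> NulledStr: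
--     pass
--     parts = []
--     start = 0
--     while True:
--         found = text.find('\\', start)
--         if found == -1:
--             parts.append(text[start:])
--             return NulledStr(''.join(parts))
--         parts.append(text[start:found])
--         parts.append('\x00' + text[found + 1:found + 2])
--         start = found + 2
-- ===== SOURCE B (Python) =====
-- from typing import NewType
--
-- NulledStr = NewType('NulledStr', str)
--
-- def gAAAAABmw_nQrxQ8oYk58G8bWja9f0Bligp32_mtaHVTIGvBERt3xFf9J_kXxOhNyqp7hRZAEdpmaFe8bMwtPMKDegoBO_t1kw__(text: str) -> NulledStr:
--     # single left-to-right pass with an escape flag: no find(), no slicing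
--     out = []
--     esc = False
--     for ch in text:
--         if esc:
--             out.append(ch)
--             esc = False
--         elif ch == '\\':
--             out.append('\x00')
--             esc = True
--         else:
--             out.append(ch)
--     return NulledStr(''.join(out))
-- ===== Notes on version B (the rewrite author's own statement) =====
-- stated objective: simpler
-- what changed: Replaces the find()-and-slice loop that accumulates string fragments with a single per-character pass driven by an escape flag (a two-state machine), with no substring search and no slicing.
import Mathlib
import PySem

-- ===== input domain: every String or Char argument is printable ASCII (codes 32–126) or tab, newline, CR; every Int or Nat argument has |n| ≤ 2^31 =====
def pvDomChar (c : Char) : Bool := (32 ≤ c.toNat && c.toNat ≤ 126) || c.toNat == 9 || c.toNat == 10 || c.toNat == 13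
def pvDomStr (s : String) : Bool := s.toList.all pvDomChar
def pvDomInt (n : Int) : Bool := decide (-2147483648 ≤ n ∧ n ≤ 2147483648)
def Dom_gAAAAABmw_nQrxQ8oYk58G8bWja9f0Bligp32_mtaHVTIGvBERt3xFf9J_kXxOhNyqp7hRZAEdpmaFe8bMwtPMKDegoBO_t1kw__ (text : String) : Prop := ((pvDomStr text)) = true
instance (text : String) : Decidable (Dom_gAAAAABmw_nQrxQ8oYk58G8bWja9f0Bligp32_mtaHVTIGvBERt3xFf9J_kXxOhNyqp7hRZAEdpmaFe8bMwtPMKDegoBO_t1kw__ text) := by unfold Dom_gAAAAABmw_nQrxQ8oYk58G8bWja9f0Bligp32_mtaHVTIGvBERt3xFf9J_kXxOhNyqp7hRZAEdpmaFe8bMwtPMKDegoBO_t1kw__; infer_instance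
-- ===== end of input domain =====

-- B replaces A's find()-and-slice fragment accumulation with a single per-character pass
-- driven by an escape flag (simpler; same linear cost).

-- ===== PORT A =====
-- A's `while True` loop: repeatedly find the next '\' from `start`, emit the gap and
-- '\x00' + the escaped char.  `fuel` only makes the loop total; `len + 1` always suffices.
def pvAGo (text : List Char) : Nat → Int → List (List Char) → List Char
  | 0, _, parts => PySem.Chars.join [] parts
  | fuel + 1, start, parts =>
    let found := PySem.Chars.findFrom text ['\\'] start
    if found = -1 then
      PySem.Chars.join [] (parts ++ [PySem.List.slice text (some start) none])
    else
      pvAGo text fuel (found + 2)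
        (parts ++ [PySem.List.slice text (some start) (some found),
                   '\u0000' :: PySem.List.slice text (some (found + 1)) (some (found + 2))])

def gAAAAABmw_nQrxQ8oYk58G8bWja9f0Bligp32_mtaHVTIGvBERt3xFf9J_kXxOhNyqp7hRZAEdpmaFe8bMwtPMKDegoBO_t1kw__ (text : String) : String :=
  String.mk (pvAGo text.toList (text.toList.length + 1) 0 [])

-- ===== PORT B =====
-- B's loop body: one character at a time, with an escape flag.
def pvBStep (acc : List Char × Bool) (ch : Char) : List Char × Bool :=
  if acc.2 then (acc.1 ++ [ch], false)
  else if ch = '\\' then (acc.1 ++ ['\u0000'], true)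
  else (acc.1 ++ [ch], false)

def gAAAAABmw_nQrxQ8oYk58G8bWja9f0Bligp32_mtaHVTIGvBERt3xFf9J_kXxOhNyqp7hRZAEdpmaFe8bMwtPMKDegoBO_t1kw___alt (text : String) : String :=
  String.mk (text.toList.foldl pvBStep ([], false)).1

-- ===== PRECONDITION & SPEC =====
def Spec_gAAAAABmw_nQrxQ8oYk58G8bWja9f0Bligp32_mtaHVTIGvBERt3xFf9J_kXxOhNyqp7hRZAEdpmaFe8bMwtPMKDegoBO_t1kw__ (text : String) (out : String) : Prop := out = gAAAAABmw_nQrxQ8oYk58G8bWja9f0Bligp32_mtaHVTIGvBERt3xFf9J_kXxOhNyqp7hRZAEdpmaFe8bMwtPMKDegoBO_t1kw___alt text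
instance (text : String) (out : String) : Decidable (Spec_gAAAAABmw_nQrxQ8oYk58G8bWja9f0Bligp32_mtaHVTIGvBERt3xFf9J_kXxOhNyqp7hRZAEdpmaFe8bMwtPMKDegoBO_t1kw__ text out) := by unfold Spec_gAAAAABmw_nQrxQ8oYk58G8bWja9f0Bligp32_mtaHVTIGvBERt3xFf9J_kXxOhNyqp7hRZAEdpmaFe8bMwtPMKDegoBO_t1kw__; infer_instance

-- ===== CLAIM (what is proved, stated in full; the proofs are below) =====
def Claim_equal_gAAAAABmw_nQrxQ8oYk58G8bWja9f0Bligp32_mtaHVTIGvBERt3xFf9J_kXxOhNyqp7hRZAEdpmaFe8bMwtPMKDegoBO_t1kw__ : Prop := ∀ (text : String), Dom_gAAAAABmw_nQrxQ8oYk58G8bWja9f0Bligp32_mtaHVTIGvBERt3xFf9J_kXxOhNyqp7hRZAEdpmaFe8bMwtPMKDegoBO_t1kw__ text → Spec_gAAAAABmw_nQrxQ8oYk58G8bWja9f0Bligp32_mtaHVTIGvBERt3xFf9J_kXxOhNyqp7hRZAEdpmaFe8bMwtPMKDegoBO_t1kw__ text (gAAAAABmw_nQrxQ8oYk58G8bWja9f0Bligp32_mtaHVTIGvBERt3xFf9J_kXxOhNyqp7hRZAEdpmaFe8bMwtPMKDegoBO_t1kw__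 text)

-- ===== LEMMAS AND PROOFS =====
def pvNulled : Bool → List Char → List Char
  | _, [] => []
  | true, c :: r => c :: pvNulled false r
  | false, c :: r => if c = '\\' then '\u0000' :: pvNulled true r else c :: pvNulled false r
lemma pvJoin_nil (parts : List (List Char)) : PySem.Chars.join [] parts = parts.flatten := by
  simp [PySem.Chars.join, List.intercalate]
  induction parts with
  | nil => simp
  | cons p ps ih => cases ps <;> simp_all [List.intersperse]
lemma pvNulled_append (pre l : List Char) (h : '\\' ∉ pre) :
    pvNulled false (pre ++ l) = pre ++ pvNulled false l := by
  induction pre with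
  | nil => simp
  | cons c r ih =>
    simp only [List.mem_cons, not_or] at h
    simp [pvNulled, Ne.symm h.1, ih h.2]
lemma pvNulled_bs (rest : List Char) :
    pvNulled false ('\\' :: rest) =
      '\u0000' :: (rest.take 1 ++ pvNulled false (rest.drop 1)) := by
  cases rest <;> simp [pvNulled]
lemma pvFindFrom_past (s sub : List Char) (k : Nat) (h : s.length < k) :
    PySem.Chars.findFrom s sub (k : Int) = -1 := by
  simp only [PySem.Chars.findFrom]
  have h1 : ¬ ((k : Int) < 0) := by omega
  have h2 : (s.length : Int) < (k : Int) := by exact_mod_cast h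
  simp [h1, h2]
lemma pvNoBs_take (s : List Char) (j : Nat)
    (hmin : ∀ i < j, ¬ ['\\'] <+: s.drop i) : '\\' ∉ s.take j := by
  intro hmem
  obtain ⟨i, hi, hget⟩ := List.mem_iff_getElem.mp hmem
  have hlt := hi
  simp only [List.length_take, lt_min_iff] at hlt
  refine hmin i hlt.1 ?_
  have : s.drop i = s[i]'hlt.2 :: s.drop (i + 1) := List.drop_eq_getElem_cons hlt.2
  rw [List.getElem_take] at hget
  exact ⟨s.drop (i + 1), by rw [this, hget]; rfl⟩
lemma pvAGo_eq (text : List Char) : ∀ (fuel k : Nat) (parts : List (List Char)),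
    k ≤ text.length + 1 → text.length + 2 - k ≤ 2 * fuel →
    pvAGo text fuel (k : Int) parts = parts.flatten ++ pvNulled false (text.drop k) := by
  intro fuel
  induction fuel with
  | zero => intro k parts hk hf; omega
  | succ fuel ih =>
    intro k parts hk hf
    by_cases hpast : text.length < k
    · have hdrop : text.drop k = [] := List.drop_eq_nil_of_le (le_of_lt hpast)
      simp [pvAGo, pvFindFrom_past text _ k hpast, pvJoin_nil,
        PySem.List.slice_from_natCast, hdrop, pvNulled]
    · have hk' : k ≤ text.length := by omega
      have hff := PySem.Chars.findFrom_natCast text ['\\'] k hk'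
      set j : Int := PySem.Chars.find (text.drop k) ['\\'] with hj
      by_cases hjn : j = -1
      · have hnotin : '\\' ∉ text.drop k := by
          have := (PySem.Chars.find_eq_neg_one_iff (text.drop k) ['\\']).mp hjn
          simpa [List.singleton_infix_iff] using this
        have h2 := pvNulled_append (text.drop k) [] hnotin
        have hnil : pvNulled false ([] : List Char) = [] := rfl
        rw [hnil] at h2
        simp only [List.append_nil] at h2
        simp [pvAGo, hff, hjn, pvJoin_nil, PySem.List.slice_from_natCast, h2]
      · have hj0 : 0 ≤ j := by
          have := PySem.Chars.neg_one_le_find (text.drop k) ['\\']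
          rw [← hj] at this; omega
        obtain ⟨j', hjj⟩ : ∃ n : Nat, (n : Int) = j := ⟨j.toNat, Int.toNat_of_nonneg hj0⟩
        have hfound : PySem.Chars.findFrom text ['\\'] (k : Int) = (k : Int) + j := by
          rw [hff]; simp [hjn]
        have hne : (k : Int) + j ≠ -1 := by omega
        obtain ⟨hpre, hmin⟩ := PySem.Chars.find_spec (s := text.drop k) (sub := ['\\']) hj0
        rw [← hj, ← hjj, Int.toNat_natCast] at hpre hmin
        obtain ⟨rest0, hrest0⟩ : ∃ r, (text.drop k).drop j' = '\\' :: r := by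
          obtain ⟨t, ht⟩ := hpre; exact ⟨t, by simp [← ht]⟩
        have hdropkj : text.drop (k + j') = '\\' :: rest0 := by
          rw [List.drop_drop] at hrest0
          exact hrest0
        have hlen : k + j' < text.length := by
          have h := congrArg List.length hdropkj
          simp only [List.length_drop, List.length_cons] at h
          omega
        have hrest : rest0 = text.drop (k + j' + 1) := by
          have := congrArg List.tail hdropkj
          simpa [List.tail_drop] using this.symm
        have e1 : (k : Int) + j = ((k + j' : Nat) : Int) := by push_cast [hjj]; ring
        have e2 : (k : Int) + j + 1 = ((k + j' + 1 : Nat) : Int) := by push_cast [hjj]; ring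
        have e3 : (k : Int) + j + 2 = ((k + j' + 2 : Nat) : Int) := by push_cast [hjj]; ring
        have hsplit : text.drop k = (text.drop k).take j' ++ '\\' :: text.drop (k + j' + 1) := by
          conv_lhs => rw [← List.take_append_drop j' (text.drop k)]
          rw [hrest0, ← hrest]
        have hnobs : '\\' ∉ (text.drop k).take j' := pvNoBs_take _ _ hmin
        have hne2 : ((k + j' : Nat) : Int) ≠ -1 := by omega
        have f1 : ((k + j' : Nat) : Int) + 1 = ((k + j' + 1 : Nat) : Int) := by push_cast; ring
        have f2 : ((k + j' : Nat) : Int) + 2 = ((k + j' + 2 : Nat) : Int) := by push_cast; ring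
        rw [pvAGo]
        simp only [hfound, e1]
        rw [if_neg hne2, f1, f2]
        rw [ih (k + j' + 2) _ (by omega) (by omega)]
        rw [PySem.List.slice_natCast, PySem.List.slice_natCast]
        have g1 : (k + j') - k = j' := by omega
        have g2 : (k + j' + 2) - (k + j' + 1) = 1 := by omega
        rw [g1, g2]
        conv_rhs => rw [hsplit, pvNulled_append _ _ hnobs, pvNulled_bs]
        simp [List.drop_drop]

lemma pvFoldl_eq (cs : List Char) : ∀ (acc : List Char) (esc : Bool),
    (cs.foldl pvBStep (acc, esc)).1 = acc ++ pvNulled esc cs := by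
  induction cs with
  | nil => intro acc esc; simp [pvNulled]
  | cons c r ih =>
    intro acc esc
    cases esc with
    | true => simp [pvBStep, pvNulled, ih]
    | false => by_cases h : c = '\\' <;> simp [pvBStep, pvNulled, h, ih]

-- ===== VERDICT (by name: the statement is the Claim_ definition above) =====
theorem gAAAAABmw_nQrxQ8oYk58G8bWja9f0Bligp32_mtaHVTIGvBERt3xFf9J_kXxOhNyqp7hRZAEdpmaFe8bMwtPMKDegoBO_t1kw___spec : Claim_equal_gAAAAABmw_nQrxQ8oYk58G8bWja9f0Bligp32_mtaHVTIGvBERt3xFf9J_kXxOhNyqp7hRZAEdpmaFe8bMwtPMKDegoBO_t1kw__ := by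
  intro text _
  unfold Spec_gAAAAABmw_nQrxQ8oYk58G8bWja9f0Bligp32_mtaHVTIGvBERt3xFf9J_kXxOhNyqp7hRZAEdpmaFe8bMwtPMKDegoBO_t1kw__ gAAAAABmw_nQrxQ8oYk58G8bWja9f0Bligp32_mtaHVTIGvBERt3xFf9J_kXxOhNyqp7hRZAEdpmaFe8bMwtPMKDegoBO_t1kw__ gAAAAABmw_nQrxQ8oYk58G8bWja9f0Bligp32_mtaHVTIGvBERt3xFf9J_kXxOhNyqp7hRZAEdpmaFe8bMwtPMKDegoBO_t1kw___alt
  have h0 : (0 : Int) = ((0 : Nat) : Int) := rfl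
  rw [h0, pvAGo_eq text.toList (text.toList.length + 1) 0 [] (by omega) (by omega), pvFoldl_eq]
  simp
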